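-- pv_equiv track=rewrite | github.com/MoritzNelle/Python_Toolbox | Software_Phonebook/Haversine_Formula.py | firstFourNumbers
-- ===== SOURCE A (Python) =====
-- def firstFourNumbers(string):
--     numbers = []
--     num = ''
--     for char in string:                     # Iterate over each character in the string
--         if char.isdigit():                  # If the character is a digit, add it to the current number
--             num += char
--         elif num:                           # If the character is not a digit and there is a current number, add the current number to the list of numbers
--             numbers.append(int(num))
--             num = ''
--         if len(numbers) == 4:               # Stop when we have found four numbers
--             break
--     if num and len(numbers) < 4:            # If there is a current number when we stop, add it to the list of numbers
--         numbers.append(int(num))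
--     return numbers[:4]                      # Return the first four numbers found
-- ===== SOURCE B (Python) =====
-- def firstFourNumbers(string):
--     # Stage 1: mask every non-digit character to a space; Stage 2: whitespace-split
--     # the masked string, so the tokens are exactly the maximal digit runs.
--     masked = ''.join(c if c.isdigit() else ' ' for c in string)
--     return [int(tok) for tok in masked.split()[:4]]
-- ===== Notes on version B (the rewrite author's own statement) =====
-- stated objective: simpler
-- what changed: Replaces A's stateful single pass (digit buffer, flush-on-separator, break counter) by two stages over a transformed string: mask every non-digit to a space, then whitespace-split the masked string and convert the first four tokens.
import Mathlib
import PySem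

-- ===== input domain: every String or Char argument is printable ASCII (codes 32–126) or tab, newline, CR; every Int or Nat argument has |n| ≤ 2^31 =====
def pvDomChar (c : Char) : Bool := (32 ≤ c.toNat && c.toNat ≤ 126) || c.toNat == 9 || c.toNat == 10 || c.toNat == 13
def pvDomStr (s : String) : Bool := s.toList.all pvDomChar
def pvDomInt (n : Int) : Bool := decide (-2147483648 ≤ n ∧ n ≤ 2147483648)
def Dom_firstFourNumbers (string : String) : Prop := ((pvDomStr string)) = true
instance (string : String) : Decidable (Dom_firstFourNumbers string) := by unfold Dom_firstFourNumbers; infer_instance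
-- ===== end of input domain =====

-- B is simpler: it masks non-digits to spaces and whitespace-splits, instead of A's stateful
-- buffer/flush/break loop; return values proved equal.

-- int(num) for a nonempty ASCII digit string num (exact there; both Pythons convert digit runs this way)
def pvToInt (cs : List Char) : Int := (PySem.Int.ofStr? (String.ofList cs)).getD 0

-- ===== PORT A =====
-- loop state: numbers (collected ints), num (current digit buffer); break returns numbers[:4]
def firstFourA : List Char → List Int → List Char → List Int
  | [], numbers, num =>
      (if num ≠ [] ∧ numbers.length < 4 then numbers ++ [pvToInt num] else numbers).take 4
  | c :: cs, numbers, num =>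
      let st :=
        if c.isDigit then (numbers, num ++ [c])
        else if num ≠ [] then (numbers ++ [pvToInt num], ([] : List Char))
        else (numbers, num)
      if st.1.length = 4 then st.1.take 4 else firstFourA cs st.1 st.2

def firstFourNumbers (string : String) : List Int := firstFourA string.toList [] []

-- ===== PORT B =====
-- str.split(): split on runs of Python whitespace (PySem.Chars.isspace); exact hand port of the
-- standard-library call Source B makes
def pvSplit : List Char → List (List Char)
  | [] => []
  | c :: cs =>
      if PySem.Chars.isspace c then pvSplit cs
      else (c :: cs.takeWhile (fun d => ¬ PySem.Chars.isspace d)) ::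
             pvSplit (cs.dropWhile (fun d => ¬ PySem.Chars.isspace d))
termination_by l => l.length
decreasing_by
  · simp
  · simpa using Nat.lt_succ_of_le (List.length_dropWhile_le _ _)

def firstFourNumbers_alt (string : String) : List Int :=
  let masked := string.toList.map (fun c => if c.isDigit then c else ' ')
  ((pvSplit masked).take 4).map pvToInt

-- ===== PRECONDITION & SPEC =====
def Spec_firstFourNumbers (string : String) (out : List Int) : Prop := out = firstFourNumbers_alt string
instance (string : String) (out : List Int) : Decidable (Spec_firstFourNumbers string out) := by unfold Spec_firstFourNumbers; infer_instance

-- ===== CLAIM =====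
def Claim_equal_firstFourNumbers : Prop := ∀ (string : String), Dom_firstFourNumbers string → Spec_firstFourNumbers string (firstFourNumbers string)

-- ===== LEMMAS AND PROOFS =====

-- the list of digit-run ints of (num ++ l) where num is the pending digit buffer
def pvCollect : List Char → List Char → List Int
  | num, [] => if num ≠ [] then [pvToInt num] else []
  | num, c :: cs =>
      if c.isDigit then pvCollect (num ++ [c]) cs
      else (if num ≠ [] then [pvToInt num] else []) ++ pvCollect [] cs

lemma firstFourA_eq_collect (l : List Char) :
    ∀ numbers num, numbers.length < 4 →
      firstFourA l numbers num = (numbers ++ pvCollect num l).take 4 := by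
  induction l with
  | nil =>
      intro numbers num h
      simp only [firstFourA, pvCollect]
      split_ifs with h1 h2 h3 <;> simp_all
  | cons c cs ih =>
      intro numbers num h
      simp only [firstFourA, pvCollect]
      by_cases hd : c.isDigit
      · simp only [hd, if_pos]
        have : numbers.length ≠ 4 := by omega
        simp [this, ih _ _ h]
      · simp only [hd, Bool.false_eq_true, if_false]
        by_cases hn : num ≠ []
        · rw [if_pos hn, if_pos hn]
          by_cases h4 : numbers.length + 1 = 4
          · have hlen : (numbers ++ [pvToInt num]).length = 4 := by simp [h4]
            rw [if_pos hlen, ← List.append_assoc,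
              List.take_append_of_le_length (le_of_eq hlen.symm)]
          · have : (numbers ++ [pvToInt num]).length ≠ 4 := by simp; omega
            rw [if_neg this, ih _ _ (by simp; omega)]
            simp [List.append_assoc]
        · rw [not_ne_iff] at hn
          subst hn
          have : numbers.length ≠ 4 := by omega
          simp [this, ih _ _ h]

lemma collect_nonempty (l : List Char) :
    ∀ num, num ≠ [] →
      pvCollect num l =
        pvToInt (num ++ l.takeWhile Char.isDigit) :: pvCollect [] (l.dropWhile Char.isDigit) := by
  induction l with
  | nil => intro num hn; simp [pvCollect, hn]
  | cons c cs ih =>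
      intro num hn
      by_cases hd : c.isDigit
      · simp only [pvCollect, hd, if_pos, List.takeWhile, List.dropWhile]
        rw [ih (num ++ [c]) (by simp)]
        simp
      · simp [pvCollect, hd, hn, List.takeWhile_cons_of_neg, List.dropWhile_cons_of_neg]

lemma isspace_of_isDigit {c : Char} (h : c.isDigit = true) : PySem.Chars.isspace c = false := by
  have hb : 48 ≤ c.toNat ∧ c.toNat ≤ 57 := by
    simp only [Char.isDigit, Bool.and_eq_true, decide_eq_true_eq] at h
    exact ⟨h.1, h.2⟩
  simp only [PySem.Chars.isspace, Bool.or_eq_false_iff, Bool.and_eq_false_iff,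
    decide_eq_false_iff_not]
  omega

lemma isspace_space : PySem.Chars.isspace ' ' = true := by decide

-- masking then taking the non-space prefix is taking the digit prefix
lemma mask_takeWhile (cs : List Char) :
    (cs.map (fun c => if c.isDigit then c else ' ')).takeWhile
        (fun d => ¬ PySem.Chars.isspace d) = cs.takeWhile Char.isDigit := by
  induction cs with
  | nil => rfl
  | cons c cs ih =>
      by_cases hd : c.isDigit
      · simp only [List.map_cons, hd, if_pos]
        rw [List.takeWhile_cons_of_pos (by simp [isspace_of_isDigit hd]),
            List.takeWhile_cons_of_pos hd, ih]
      · simp only [List.map_cons, hd, Bool.false_eq_true, if_false]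
        rw [List.takeWhile_cons_of_neg (by simp [isspace_space]),
            List.takeWhile_cons_of_neg (by simp [hd])]

lemma mask_dropWhile (cs : List Char) :
    (cs.map (fun c => if c.isDigit then c else ' ')).dropWhile
        (fun d => ¬ PySem.Chars.isspace d)
      = (cs.dropWhile Char.isDigit).map (fun c => if c.isDigit then c else ' ') := by
  induction cs with
  | nil => rfl
  | cons c cs ih =>
      by_cases hd : c.isDigit
      · simp only [List.map_cons, hd, if_pos]
        rw [List.dropWhile_cons_of_pos (by simp [isspace_of_isDigit hd]),
            List.dropWhile_cons_of_pos hd, ih]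
      · simp only [List.map_cons, hd, Bool.false_eq_true, if_false]
        rw [List.dropWhile_cons_of_neg (by simp [isspace_space]),
            List.dropWhile_cons_of_neg (by simp [hd])]
        simp [hd]

-- the masked-and-split tokens are exactly the maximal digit runs
lemma collect_eq_split_aux (n : Nat) :
    ∀ (l : List Char), l.length ≤ n →
      pvCollect [] l = (pvSplit (l.map (fun c => if c.isDigit then c else ' '))).map pvToInt := by
  induction n with
  | zero =>
      intro l hl
      have : l = [] := List.eq_nil_of_length_eq_zero (Nat.le_zero.mp hl)
      subst this
      simp [pvCollect, pvSplit]
  | succ n ihn =>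
      intro l hl
      match l with
      | [] => simp [pvCollect, pvSplit]
      | c :: cs =>
      have hlen : cs.length ≤ n := by simpa using hl
      by_cases hd : c.isDigit
      · -- head is a digit: the first token is the leading digit run
        have hmc : (if c.isDigit then c else ' ') = c := by simp [hd]
        rw [List.map_cons, hmc, pvSplit, if_neg (by simp [isspace_of_isDigit hd])]
        rw [mask_takeWhile, mask_dropWhile]
        rw [List.map_cons]
        rw [show pvCollect [] (c :: cs) = pvCollect [c] cs by simp [pvCollect, hd],
            collect_nonempty cs [c] (by simp)]
        rw [ihn _ (le_trans (List.length_dropWhile_le _ _) hlen)]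
        simp
      · -- head is not a digit: it masks to a space and is skipped by split
        have hmc : (if c.isDigit then c else ' ') = ' ' := by simp [hd]
        rw [List.map_cons, hmc, pvSplit, if_pos isspace_space]
        have : pvCollect [] (c :: cs) = pvCollect [] cs := by simp [pvCollect, hd]
        rw [this, ihn _ hlen]

-- ===== VERDICT =====
theorem firstFourNumbers_spec : Claim_equal_firstFourNumbers := by
  intro s _
  unfold Spec_firstFourNumbers firstFourNumbers firstFourNumbers_alt
  rw [firstFourA_eq_collect _ _ _ (by simp), collect_eq_split_aux s.toList.length s.toList le_rfl]
  simp [List.map_take]
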